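-- pv_equiv track=rewrite | github.com/JakePaulRose/Orion | bin_tools.py | match_dimensions
-- ===== SOURCE A (Python) =====
-- def match_dimensions(ndarray, onedarray):
--     """
--     Return an N-D array of shape ndarray.shape with the values of onedarray
--     """
--     ndreturn = []
--     idx = 0
--     for sublist in ndarray:
--         num = len(sublist)
--         subreturn = onedarray[idx : idx + num]
--         idx += num
--         ndreturn.append(subreturn)
--     return ndreturn
-- ===== SOURCE B (Python) =====
-- def match_dimensions(ndarray, onedarray):
--     """
--     Return an N-D array of shape ndarray.shape with the values of onedarray
--     """
--     lengths = [len(sublist) for sublist in ndarray]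
--     offsets = [0]
--     for num in lengths:
--         offsets.append(offsets[-1] + num)
--     return [onedarray[a:b] for a, b in zip(offsets, offsets[1:])]
-- ===== Notes on version B (the rewrite author's own statement) =====
-- stated objective: idiomatic
-- what changed: Replaces the threaded running-index accumulator that builds each slice inside one loop with a precomputed prefix-sum offsets table followed by a pairwise zip/comprehension that slices between consecutive boundaries.
import Mathlib
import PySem

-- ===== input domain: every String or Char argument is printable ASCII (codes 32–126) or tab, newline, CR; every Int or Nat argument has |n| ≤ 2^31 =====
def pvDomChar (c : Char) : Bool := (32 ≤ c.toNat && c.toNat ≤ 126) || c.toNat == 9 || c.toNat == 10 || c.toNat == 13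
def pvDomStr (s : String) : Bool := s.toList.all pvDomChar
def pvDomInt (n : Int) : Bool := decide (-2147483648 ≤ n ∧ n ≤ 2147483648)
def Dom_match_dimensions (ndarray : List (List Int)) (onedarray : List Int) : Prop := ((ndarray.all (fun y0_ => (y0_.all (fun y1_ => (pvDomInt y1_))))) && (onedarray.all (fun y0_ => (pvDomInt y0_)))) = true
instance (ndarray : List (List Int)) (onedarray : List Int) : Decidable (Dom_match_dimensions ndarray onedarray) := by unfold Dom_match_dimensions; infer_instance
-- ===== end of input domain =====

-- ===== PORT A =====
-- B replaces A's threaded running-index loop with a prefix-sum offsets table and pairwise slicing (idiomatic; same cost).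
def match_dimensions (ndarray : List (List Int)) (onedarray : List Int) : List (List Int) :=
  (ndarray.foldl (fun st sublist =>
      let num : Int := sublist.length
      let subreturn := PySem.List.slice onedarray (some st.2) (some (st.2 + num))
      (st.1 ++ [subreturn], st.2 + num))
    (([] : List (List Int)), (0 : Int))).1

-- ===== PORT B =====
def match_dimensions_alt (ndarray : List (List Int)) (onedarray : List Int) : List (List Int) :=
  let lengths : List Int := ndarray.map (fun sublist => (sublist.length : Int))
  let offsets : List Int := lengths.foldl (fun off num => off ++ [off.getLast! + num]) [0]
  (offsets.zip offsets.tail).map (fun p => PySem.List.slice onedarray (some p.1) (some p.2))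

-- ===== PRECONDITION & SPEC =====
def Spec_match_dimensions (ndarray : List (List Int)) (onedarray : List Int) (out : List (List Int)) : Prop := out = match_dimensions_alt ndarray onedarray
instance (ndarray : List (List Int)) (onedarray : List Int) (out : List (List Int)) : Decidable (Spec_match_dimensions ndarray onedarray out) := by unfold Spec_match_dimensions; infer_instance

-- ===== CLAIM (what is proved, stated in full; the proofs are below) =====
def Claim_equal_match_dimensions : Prop := ∀ (ndarray : List (List Int)) (onedarray : List Int), Dom_match_dimensions ndarray onedarray → Spec_match_dimensions ndarray onedarray (match_dimensions ndarray onedarray)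

-- ===== LEMMAS AND PROOFS =====

-- common reference form: the slice of onedarray for each sublist, with a running start index
def mdRef (onedarray : List Int) : List (List Int) → Int → List (List Int)
  | [], _ => []
  | s :: t, idx =>
      PySem.List.slice onedarray (some idx) (some (idx + (s.length : Int))) :: mdRef onedarray t (idx + (s.length : Int))

-- running offsets after the head element
def mdScan : List Int → Int → List Int
  | [], _ => []
  | n :: t, x => (x + n) :: mdScan t (x + n)

theorem mdA_foldl (onedarray : List Int) :
    ∀ (nd : List (List Int)) (acc : List (List Int)) (idx : Int),
    (nd.foldl (fun st sublist =>
        let num : Int := sublist.length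
        let subreturn := PySem.List.slice onedarray (some st.2) (some (st.2 + num))
        (st.1 ++ [subreturn], st.2 + num)) (acc, idx)).1
      = acc ++ mdRef onedarray nd idx := by
  intro nd
  induction nd with
  | nil => intro acc idx; simp [mdRef]
  | cons s t ih =>
      intro acc idx
      simp only [List.foldl_cons, mdRef, ih, List.append_assoc, List.singleton_append]

theorem mdLast_concat (acc : List Int) (x : Int) : (acc ++ [x]).getLast! = x := by
  induction acc with
  | nil => rfl
  | cons a t ih =>
      cases t with
      | nil => rfl
      | cons b u => simp [List.getLast!] at ih ⊢

theorem mdB_offsets :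
    ∀ (ls : List Int) (acc : List Int) (x : Int),
    (ls.foldl (fun off num => off ++ [off.getLast! + num]) (acc ++ [x]))
      = (acc ++ [x]) ++ mdScan ls x := by
  intro ls
  induction ls with
  | nil => intro acc x; simp [mdScan]
  | cons n t ih =>
      intro acc x
      simp only [List.foldl_cons, mdLast_concat, mdScan]
      rw [List.append_assoc acc [x] [x + n]]
      have := ih (acc ++ [x]) (x + n)
      simpa [List.append_assoc] using this

theorem mdB_zip (onedarray : List Int) :
    ∀ (nd : List (List Int)) (x : Int),
    (((x :: mdScan (nd.map (fun s => (s.length : Int))) x).zip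
        (mdScan (nd.map (fun s => (s.length : Int))) x)).map
      (fun p => PySem.List.slice onedarray (some p.1) (some p.2))) = mdRef onedarray nd x := by
  intro nd
  induction nd with
  | nil => intro x; simp [mdScan, mdRef]
  | cons s t ih =>
      intro x
      simp only [List.map_cons, mdScan, mdRef, List.zip_cons_cons, List.map]
      exact congrArg _ (ih (x + (s.length : Int)))

theorem mdB_offsets0 (ls : List Int) :
    (ls.foldl (fun off num => off ++ [off.getLast! + num]) [0]) = 0 :: mdScan ls 0 := by
  simpa using mdB_offsets ls [] 0

-- ===== VERDICT (by name: the statement is the Claim_ definition above) =====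
theorem match_dimensions_spec : Claim_equal_match_dimensions := by
  intro ndarray onedarray _
  unfold Spec_match_dimensions match_dimensions match_dimensions_alt
  simp only [mdA_foldl, mdB_offsets0, List.tail_cons, mdB_zip, List.nil_append]
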